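-- pv_equiv track=rewrite | github.com/AlexEngelhardt-old/courses | Data Structures and Algorithms/01 Algorithmic Toolbox/Week 2 - Algorithmic Warm-up/assignment/4_lcm.py | lcm_faster
-- ===== SOURCE A (Python) =====
-- def lcm_faster(a, b):
--     """This one is faster, but doesn't seem perfect just yet."""
--     if a <= b:
--         smaller, larger = a, b
--     else:
--         smaller, larger = b, a
--     lcm_candidate = larger
--     while lcm_candidate % smaller:
--         lcm_candidate += larger
--     return lcm_candidate
-- ===== SOURCE B (Python) =====
-- def lcm_faster(a, b):
--     """Exact LCM via the Euclidean algorithm: larger * (|smaller| // gcd)."""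
--     if a <= b:
--         smaller, larger = a, b
--     else:
--         smaller, larger = b, a
--     x, y = abs(larger), abs(smaller)
--     while y:
--         x, y = y, x % y
--     return larger * (abs(smaller) // x)
-- ===== Notes on version B (the rewrite author's own statement) =====
-- stated objective: faster
-- what changed: Replaces the trial loop that adds `larger` until the candidate is divisible by `smaller` with a closed form larger*(|smaller|//gcd) computed by the Euclidean algorithm.
import Mathlib
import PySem

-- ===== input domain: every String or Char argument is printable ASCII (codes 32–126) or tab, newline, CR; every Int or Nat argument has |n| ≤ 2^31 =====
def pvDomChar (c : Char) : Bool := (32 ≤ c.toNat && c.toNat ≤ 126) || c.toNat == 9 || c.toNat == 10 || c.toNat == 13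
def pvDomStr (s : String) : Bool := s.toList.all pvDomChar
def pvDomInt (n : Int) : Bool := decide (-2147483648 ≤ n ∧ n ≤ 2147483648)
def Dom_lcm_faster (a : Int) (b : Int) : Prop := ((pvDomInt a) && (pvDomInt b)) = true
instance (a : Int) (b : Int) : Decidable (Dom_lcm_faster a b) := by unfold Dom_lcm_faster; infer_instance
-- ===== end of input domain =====

-- B replaces A's repeated-addition search for the lcm by the closed form larger*(|smaller|//gcd)
-- with gcd computed by the Euclidean algorithm (faster: asymptotic, O(log) vs O(|smaller|/gcd) loop steps).


-- ===== PORT A =====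
-- the while-loop; fuel = |smaller| always suffices (the loop stops after at most
-- |smaller|/gcd - 1 additions); when smaller = 0 Python raises (excluded by Pre_).
def lcmLoopA (smaller larger : Int) : Nat → Int → Int
  | 0, c => c
  | n + 1, c => if PySem.Int.mod c smaller = 0 then c else lcmLoopA smaller larger n (c + larger)

def lcm_faster (a : Int) (b : Int) : Int :=
  match (if a ≤ b then (a, b) else (b, a)) with
  | (smaller, larger) => lcmLoopA smaller larger smaller.natAbs larger

-- ===== PORT B =====
-- Euclid's loop `while y: x, y = y, x % y`; both operands are nonnegative so Python % = Nat.mod (exact).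
def euclidB : Nat → Nat → Nat
  | x, 0 => x
  | x, (y + 1) => euclidB (y + 1) (x % (y + 1))
  decreasing_by exact Nat.mod_lt _ (Nat.succ_pos _)

def lcm_faster_alt (a : Int) (b : Int) : Int :=
  match (if a ≤ b then (a, b) else (b, a)) with
  -- abs(larger), abs(smaller) and abs(smaller) // x are all nonnegative, so Nat arithmetic is exact
  | (smaller, larger) => larger * ((smaller.natAbs / euclidB larger.natAbs smaller.natAbs : Nat) : Int)

-- ===== PRECONDITION & SPEC =====
-- Pre_ excludes exactly min(a,b) = 0, where A's `lcm_candidate % smaller` raises ZeroDivisionError.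
def Pre_lcm_faster (a : Int) (b : Int) : Prop := (if a ≤ b then a else b) ≠ 0
instance (a : Int) (b : Int) : Decidable (Pre_lcm_faster a b) := by unfold Pre_lcm_faster; infer_instance

def pvWitness_lcm_faster : Int × Int := (4, 6)

def Spec_lcm_faster (a : Int) (b : Int) (out : Int) : Prop := out = lcm_faster_alt a b
instance (a : Int) (b : Int) (out : Int) : Decidable (Spec_lcm_faster a b out) := by unfold Spec_lcm_faster; infer_instance

-- ===== CLAIM (what is proved, stated in full; the proofs are below) =====
def Claim_equal_lcm_faster : Prop := ∀ (a : Int) (b : Int), Dom_lcm_faster a b → Pre_lcm_faster a b → Spec_lcm_faster a b (lcm_faster a b)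

-- ===== LEMMAS AND PROOFS =====

-- euclidB is Nat.gcd
theorem euclidB_eq_gcd (x y : Nat) : euclidB x y = Nat.gcd x y := by
  induction y using Nat.strong_induction_on generalizing x with
  | _ y ih =>
    match y with
    | 0 => simp [euclidB]
    | y + 1 =>
      rw [euclidB, ih (x % (y + 1)) (Nat.mod_lt _ (Nat.succ_pos _))]
      rw [Nat.gcd_comm (y + 1) (x % (y + 1)), ← Nat.gcd_rec, Nat.gcd_comm]

-- divisibility characterisation: s ∣ L*k  ↔  S/gcd(L,S) ∣ k  (Nat version)
theorem key_dvd (L S k : Nat) (hS : 0 < S) :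
    (S ∣ L * k) ↔ (S / Nat.gcd L S ∣ k) := by
  set g := Nat.gcd L S with hg
  have hgpos : 0 < g := Nat.gcd_pos_of_pos_right _ hS
  have hgL : g ∣ L := Nat.gcd_dvd_left _ _
  have hgS : g ∣ S := Nat.gcd_dvd_right _ _
  have hcop : Nat.Coprime (S / g) (L / g) := (Nat.coprime_div_gcd_div_gcd hgpos).symm
  constructor
  · intro h
    have h2 : g * (S / g) ∣ g * (L / g * k) := by
      rw [Nat.mul_div_cancel' hgS, ← Nat.mul_assoc, Nat.mul_div_cancel' hgL]; exact h
    have h3 : S / g ∣ L / g * k := (Nat.mul_dvd_mul_iff_left hgpos).mp h2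
    exact hcop.dvd_of_dvd_mul_left h3
  · intro h
    calc S = g * (S / g) := (Nat.mul_div_cancel' hgS).symm
      _ ∣ g * k := Nat.mul_dvd_mul_left g h
      _ ∣ L / g * (g * k) := dvd_mul_left _ _
      _ = L * k := by rw [← Nat.mul_assoc, Nat.div_mul_cancel hgL]
  
-- Int version: s ∣ l*k ↔ K ∣ k with K = |s| / gcd(|l|,|s|)
theorem key_dvd_int (l s : Int) (k : Nat) (hs : s ≠ 0) :
    (PySem.Int.mod (l * (k : Int)) s = 0) ↔ (s.natAbs / Nat.gcd l.natAbs s.natAbs ∣ k) := by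
  rw [PySem.Int.mod_eq_zero_iff_dvd]
  have : (s ∣ l * (k : Int)) ↔ (s.natAbs ∣ (l * (k : Int)).natAbs) := Int.natAbs_dvd_natAbs.symm
  rw [this, Int.natAbs_mul, Int.natAbs_natCast]
  exact key_dvd l.natAbs s.natAbs k (Int.natAbs_pos.mpr hs)

-- loop invariant: starting at candidate l*k with 1 ≤ k ≤ K and enough fuel, the loop returns l*K
theorem lcmLoopA_eq (s l : Int) (hs : s ≠ 0) :
    ∀ (n k : Nat), 1 ≤ k → k ≤ s.natAbs / Nat.gcd l.natAbs s.natAbs →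
      s.natAbs / Nat.gcd l.natAbs s.natAbs ≤ k + n →
      lcmLoopA s l n (l * (k : Int)) = l * ((s.natAbs / Nat.gcd l.natAbs s.natAbs : Nat) : Int) := by
  intro n
  set K := s.natAbs / Nat.gcd l.natAbs s.natAbs with hK
  induction n with
  | zero =>
    intro k hk1 hkK hKk
    have : k = K := Nat.le_antisymm hkK (by omega)
    rw [this]; simp [lcmLoopA]
  | succ n ih =>
    intro k hk1 hkK hKk
    rw [lcmLoopA]
    by_cases hdvd : K ∣ k
    · have hkeq : k = K := by
        rcases hdvd with ⟨m, rfl⟩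
        have hm : 0 < m := Nat.pos_of_ne_zero (by rintro rfl; simp at hk1)
        exact Nat.le_antisymm hkK (Nat.le_mul_of_pos_right K hm)
      rw [if_pos ((key_dvd_int l s k hs).mpr hdvd), hkeq]
    · rw [if_neg (by rw [key_dvd_int l s k hs]; exact hdvd)]
      have : l * (k : Int) + l = l * ((k + 1 : Nat) : Int) := by push_cast; ring
      rw [this]
      apply ih (k + 1) (by omega)
      · -- k + 1 ≤ K since k ≤ K and k ≠ K (K ∤ k would fail if k = K)
        rcases Nat.lt_or_ge k K with h | h
        · omega
        · exact absurd (Nat.le_antisymm hkK h ▸ dvd_refl K) hdvd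
      · omega

-- glue: the loop from A with fuel |s| equals B's closed form, for s ≠ 0
theorem lcm_glue (s l : Int) (hs : s ≠ 0) :
    lcmLoopA s l s.natAbs l = l * ((s.natAbs / euclidB l.natAbs s.natAbs : Nat) : Int) := by
  rw [euclidB_eq_gcd]
  have hg : 0 < Nat.gcd l.natAbs s.natAbs :=
    Nat.gcd_pos_of_pos_right _ (Int.natAbs_pos.mpr hs)
  have hK1 : 1 ≤ s.natAbs / Nat.gcd l.natAbs s.natAbs :=
    (Nat.one_le_div_iff hg).mpr (Nat.le_of_dvd (Int.natAbs_pos.mpr hs) (Nat.gcd_dvd_right _ _))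
  have hKle : s.natAbs / Nat.gcd l.natAbs s.natAbs ≤ s.natAbs := Nat.div_le_self _ _
  have := lcmLoopA_eq s l hs s.natAbs 1 (le_refl 1) hK1 (by omega)
  simpa using this

-- ===== VERDICT (by name: the statement is the Claim_ definition above) =====
theorem lcm_faster_spec : Claim_equal_lcm_faster := by
  intro a b _ hpre
  unfold Pre_lcm_faster at hpre
  unfold Spec_lcm_faster lcm_faster lcm_faster_alt
  by_cases h : a ≤ b
  · simp only [if_pos h] at hpre ⊢
    exact lcm_glue a b hpre
  · simp only [if_neg h] at hpre ⊢
    exact lcm_glue b a hpre
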